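-- pv_equiv track=rewrite | github.com/NaeDofe/BotTuKuuRu | conv.py | odm
-- ===== SOURCE A (Python) =====
-- def odm(msg):
--     new_msg = """"""
--     hasStart = False
--     for char in msg:
--         if char == "[":
--             hasStart = True
--         elif char == "]" and hasStart:
--             hasStart = False
--         elif char in ["+","-","/","*"]:
--             continue
--         elif not hasStart:
--             new_msg += char
--     return new_msg
-- ===== SOURCE B (Python) =====
-- def odm(msg):
--     parts = []
--     i = 0
--     while True:
--         j = msg.find('[', i)
--         if j == -1:
--             parts.append(msg[i:])
--             break
--         parts.append(msg[i:j])
--         k = msg.find(']', j + 1)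
--         if k == -1:
--             break
--         i = k + 1
--     stripped = ''.join(parts)
--     return ''.join(c for c in stripped if c not in '+-*/')
-- ===== Notes on version B (the rewrite author's own statement) =====
-- stated objective: simpler
-- what changed: Replaces A's character-by-character loop with a mutable hasStart flag by two independent passes: a find-based scan that jumps over each '['..']' region (keeping unmatched ']' and an unterminated tail dropped as A does), followed by a plain filter removing '+-*/'.
import Mathlib
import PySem

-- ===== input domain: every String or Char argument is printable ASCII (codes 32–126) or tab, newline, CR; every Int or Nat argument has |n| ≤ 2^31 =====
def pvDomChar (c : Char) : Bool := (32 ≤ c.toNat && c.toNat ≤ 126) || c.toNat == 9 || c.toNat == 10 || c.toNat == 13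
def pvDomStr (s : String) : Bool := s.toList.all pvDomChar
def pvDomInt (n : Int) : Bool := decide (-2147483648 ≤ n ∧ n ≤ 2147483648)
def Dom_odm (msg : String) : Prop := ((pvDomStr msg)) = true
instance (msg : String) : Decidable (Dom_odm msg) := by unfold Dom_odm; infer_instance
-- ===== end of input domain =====

-- B replaces A's single flag-driven character loop by two passes: jump-based removal of each
-- '['…']' region, then a filter that drops the operator characters (objective: simpler).

-- ===== PORT A =====
-- A's loop body, one character at a time over the state (new_msg, hasStart)
def odmStep (st : List Char × Bool) (c : Char) : List Char × Bool :=
  if c = '[' then (st.1, true)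
  else if c = ']' ∧ st.2 = true then (st.1, false)
  else if c = '+' ∨ c = '-' ∨ c = '/' ∨ c = '*' then st
  else if st.2 = false then (st.1 ++ [c], st.2) else st

def odm (msg : String) : String :=
  String.ofList (msg.toList.foldl odmStep ([], false)).1

-- ===== PORT B =====
-- drop characters up to and including the first ']' (the "find(']', j+1)" jump of Source B)
def pvSkip : List Char → List Char
  | [] => []
  | c :: r => if c = ']' then r else pvSkip r

theorem pvSkip_len_le : ∀ l : List Char, (pvSkip l).length ≤ l.length := by
  intro l; induction l with
  | nil => simp [pvSkip]
  | cons c r ih => simp only [pvSkip]; split <;> simp <;> omega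

-- copy up to each '[', then resume after the matching ']' (or stop at end): Source B's first pass
def pvDebr : List Char → List Char
  | [] => []
  | c :: r =>
    if c = '[' then pvDebr (pvSkip r)
    else c :: pvDebr r
termination_by l => l.length
decreasing_by
  · exact Nat.lt_succ_of_le (pvSkip_len_le r)
  · simp

def pvIsOp (c : Char) : Bool := c = '+' || c = '-' || c = '*' || c = '/'

def odm_alt (msg : String) : String :=
  String.ofList (((pvDebr msg.toList).filter (fun c => !pvIsOp c)))

-- ===== PRECONDITION & SPEC =====
def Spec_odm (msg : String) (out : String) : Prop := out = odm_alt msg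
instance (msg : String) (out : String) : Decidable (Spec_odm msg out) := by unfold Spec_odm; infer_instance

-- ===== CLAIM (what is proved, stated in full; the proofs are below) =====
def Claim_equal_odm : Prop := ∀ (msg : String), Dom_odm msg → Spec_odm msg (odm msg)

-- ===== LEMMAS AND PROOFS =====

-- while hasStart is set, A drops everything up to and including the first ']'
theorem loop_true (l : List Char) : ∀ acc : List Char,
    (l.foldl odmStep (acc, true)).1 = ((pvSkip l).foldl odmStep (acc, false)).1 := by
  induction l with
  | nil => intro acc; simp [pvSkip]
  | cons c r ih =>
    intro acc
    by_cases hb : c = '['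
    · subst hb; simp [List.foldl, odmStep, pvSkip, ih acc]
    · by_cases hc : c = ']'
      · subst hc; simp [List.foldl, odmStep, pvSkip]
      · by_cases hop : c = '+' ∨ c = '-' ∨ c = '/' ∨ c = '*'
        · simp [List.foldl, odmStep, hb, hc, hop, pvSkip, ih acc]
        · simp [List.foldl, odmStep, hb, hc, hop, pvSkip, ih acc]

-- with hasStart clear, A's remaining work is B's two passes on the remaining input
theorem loop_false_fuel : ∀ (n : Nat) (l : List Char), l.length ≤ n → ∀ acc : List Char,
    (l.foldl odmStep (acc, false)).1 = acc ++ (pvDebr l).filter (fun c => !pvIsOp c) := by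
  intro n
  induction n with
  | zero =>
    intro l hl acc
    have : l = [] := List.eq_nil_of_length_eq_zero (Nat.le_zero.mp hl)
    subst this; simp [pvDebr]
  | succ n ih =>
    intro l hl acc
    match l with
    | [] => simp [pvDebr]
    | c :: r =>
      have hr : r.length ≤ n := by simpa using Nat.lt_succ_iff.mp (Nat.lt_of_lt_of_le (by simp) hl)
      by_cases hb : c = '['
      · subst hb
        have h1 : (('[' :: r).foldl odmStep (acc, false)).1 = (r.foldl odmStep (acc, true)).1 := by
          simp [List.foldl, odmStep]
        rw [h1, loop_true r acc, ih (pvSkip r) (Nat.le_trans (pvSkip_len_le r) hr) acc]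
        simp [pvDebr]
      · by_cases hop : c = '+' ∨ c = '-' ∨ c = '/' ∨ c = '*'
        · have hc : ¬ (c = ']' ∧ (false : Bool) = true) := by simp
          have h1 : ((c :: r).foldl odmStep (acc, false)) = (r.foldl odmStep (acc, false)) := by
            simp [List.foldl, odmStep, hb, hop]
          have hopb : pvIsOp c = true := by
            rcases hop with h | h | h | h <;> simp [pvIsOp, h]
          rw [h1, ih r hr acc]
          simp [pvDebr, hb, hopb]
        · have h1 : ((c :: r).foldl odmStep (acc, false)) = (r.foldl odmStep (acc ++ [c], false)) := by
            simp [List.foldl, odmStep, hb, hop]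
          have hopb : pvIsOp c = false := by
            push_neg at hop
            simp [pvIsOp, hop.1, hop.2.1, hop.2.2.1, hop.2.2.2]
          rw [h1, ih r hr (acc ++ [c])]
          simp [pvDebr, hb, hopb]

theorem loop_false (l acc : List Char) :
    (l.foldl odmStep (acc, false)).1 = acc ++ (pvDebr l).filter (fun c => !pvIsOp c) :=
  loop_false_fuel l.length l (Nat.le_refl _) acc

-- ===== VERDICT (by name: the statement is the Claim_ definition above) =====
theorem odm_spec : Claim_equal_odm := by
  intro msg _
  unfold Spec_odm odm odm_alt
  rw [loop_false msg.toList []]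
  simp
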